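-- pv_equiv track=rewrite | github.com/rogerrojur/nl2sql | sqlova/annotate_nlpir.py | tokens_full_match
-- ===== SOURCE A (Python) =====
-- def find_str_wvi_full_match(s, l):
--     # from stack overflow.
--     # s 包括 l 中的一个连续的子序列
--     results = []
--     s_len, l_len = len(s), len(l)
--
--     if not results:
--         for ix, token in enumerate(l):
--             if len(token) == 0:
--                 continue
--             if s[0] == token[0]:
--                 tmp_str, tmp_idx = '', ix
--                 while len(tmp_str) < s_len and tmp_idx < l_len:
--                     tmp_str += l[tmp_idx]
--                     tmp_idx += 1
--                 if tmp_str == s: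
--                     # 找到完全匹配
--                     return [ix, tmp_idx-1]
--     return None
--
-- def tokens_full_match(token_list, words):
--     # words：候选词列表
--     # token_list: 被替换的词列表
--     new_list = token_list
--     for word in words:
--         if len(word) == 0:
--             continue
--         wvi = find_str_wvi_full_match(word, new_list)
--         if wvi == None:
--             continue
--         new_list = new_list[:wvi[0]] + [''.join(new_list[ wvi[0] : wvi[1]+1 ])] + new_list[wvi[1]+1:]
--     return new_list
-- ===== SOURCE B (Python) =====
-- def _peel(rest, toks, j):
--     # consume tokens from index j while some of the word remains;
--     # return the exclusive end index, or None if the span cannot match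
--     while rest:
--         if j == len(toks):
--             return None
--         t = toks[j]
--         if not rest.startswith(t):
--             return None
--         rest = rest[len(t):]
--         j += 1
--     return j
--
--
-- def _find_span(word, toks):
--     # first start index whose token run concatenates exactly to word
--     for i, t in enumerate(toks):
--         if t and word.startswith(t):
--             j = _peel(word[len(t):], toks, i + 1)
--             if j is not None:
--                 return i, j
--     return None
--
--
-- def tokens_full_match(token_list, words):
--     new_list = token_list
--     for word in words:
--         if not word:
--             continue
--         span = _find_span(word, new_list)
--         if span is not None:
--             i, j = span
--             new_list = new_list[:i] + [''.join(new_list[i:j])] + new_list[j:]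
--     return new_list
-- ===== Notes on version B (the rewrite author's own statement) =====
-- stated objective: alternative
-- what changed: A, at each candidate start, concatenates tokens until the buffer reaches the word's length and only then compares the whole buffer against the word; B instead peels the word prefix-by-prefix (each token must be a prefix of the remaining word, with an exclusive end index), so mismatching starts are abandoned at the first non-matching token instead of after building a full-length buffer.
import Mathlib
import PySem

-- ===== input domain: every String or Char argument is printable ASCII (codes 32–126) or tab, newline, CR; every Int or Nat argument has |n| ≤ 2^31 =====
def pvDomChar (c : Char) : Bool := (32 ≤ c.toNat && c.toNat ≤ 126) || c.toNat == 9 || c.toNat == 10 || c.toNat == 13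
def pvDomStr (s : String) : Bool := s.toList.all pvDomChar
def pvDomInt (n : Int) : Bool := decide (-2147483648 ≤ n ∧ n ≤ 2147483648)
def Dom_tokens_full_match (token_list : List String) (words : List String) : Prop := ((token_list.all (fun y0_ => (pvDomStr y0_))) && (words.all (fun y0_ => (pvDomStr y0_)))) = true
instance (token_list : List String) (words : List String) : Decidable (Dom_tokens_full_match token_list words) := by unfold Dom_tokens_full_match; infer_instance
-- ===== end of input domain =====

-- B replaces A's concatenate-until-long-enough-then-compare scan by prefix-peeling with early
-- exit (objective: alternative; same worst case, different algorithmic structure).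

-- ===== PORT A =====
-- the while loop of find_str_wvi_full_match:
--   while len(tmp_str) < s_len and tmp_idx < l_len: tmp_str += l[tmp_idx]; tmp_idx += 1
-- (l.getD tmpIdx "" is exact: the loop guard keeps tmpIdx < l.length); returns (tmp_str, tmp_idx)
def fswLoop (l : List String) (sLen : Nat) (tmp : List Char) (tmpIdx : Nat) : List Char × Nat :=
  if h : tmp.length < sLen ∧ tmpIdx < l.length then
    fswLoop l sLen (tmp ++ (l.getD tmpIdx "").toList) (tmpIdx + 1)
  else (tmp, tmpIdx)
termination_by l.length - tmpIdx
decreasing_by omega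

-- the 'for ix, token in enumerate(l)' loop of find_str_wvi_full_match ('if not results:' is
-- always true and dropped; 's[0] == token[0]' is head? equality — s and token are nonempty here)
def fswFind (s : List Char) (l : List String) (ix : Nat) (rest : List String) : Option (Nat × Nat) :=
  match rest with
  | [] => none
  | token :: ts =>
    if token.toList.length = 0 then fswFind s l (ix + 1) ts
    else if s.head? == token.toList.head? then
      if (fswLoop l s.length [] ix).1 = s then some (ix, (fswLoop l s.length [] ix).2 - 1)
      else fswFind s l (ix + 1) ts
    else fswFind s l (ix + 1) ts

def tokens_full_match (token_list : List String) (words : List String) : List String :=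
  words.foldl (fun new_list word =>
    if word.toList.length = 0 then new_list
    else match fswFind word.toList new_list 0 new_list with
      | none => new_list
      | some (a, b) =>
        PySem.List.slice new_list none (some (a : Int))
          ++ [PySem.Str.join "" (PySem.List.slice new_list (some (a : Int)) (some ((b : Int) + 1)))]
          ++ PySem.List.slice new_list (some ((b : Int) + 1)) none) token_list

-- ===== PORT B =====
-- _peel: consume tokens from index j while some of the word remains; exclusive end index or none
def peelB (toks : List String) (j : Nat) (rest : List Char) : Option Nat :=
  if rest = [] then some j
  else if h : j < toks.length then
    if PySem.Chars.startswith rest toks[j].toList then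
      peelB toks (j + 1) (rest.drop toks[j].toList.length)
    else none
  else none
termination_by toks.length - j
decreasing_by omega

-- _find_span: first start index whose token run concatenates exactly to word
def findSpanB (word : List Char) (toks : List String) (i : Nat) (rest : List String) : Option (Nat × Nat) :=
  match rest with
  | [] => none
  | t :: ts =>
    if t.toList ≠ [] ∧ PySem.Chars.startswith word t.toList then
      match peelB toks (i + 1) (word.drop t.toList.length) with
      | some j => some (i, j)
      | none => findSpanB word toks (i + 1) ts
    else findSpanB word toks (i + 1) ts

def tokens_full_match_alt (token_list : List String) (words : List String) : List String :=
  words.foldl (fun new_list word =>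
    if word.toList = [] then new_list
    else match findSpanB word.toList new_list 0 new_list with
      | none => new_list
      | some (i, j) =>
        PySem.List.slice new_list none (some (i : Int))
          ++ [PySem.Str.join "" (PySem.List.slice new_list (some (i : Int)) (some (j : Int)))]
          ++ PySem.List.slice new_list (some (j : Int)) none) token_list

-- ===== PRECONDITION & SPEC =====
def Spec_tokens_full_match (token_list : List String) (words : List String) (out : List String) : Prop := out = tokens_full_match_alt token_list words
instance (token_list : List String) (words : List String) (out : List String) : Decidable (Spec_tokens_full_match token_list words out) := by unfold Spec_tokens_full_match; infer_instance

-- ===== CLAIM (what is proved, stated in full; the proofs are below) =====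
def Claim_equal_tokens_full_match : Prop := ∀ (token_list : List String) (words : List String), Dom_tokens_full_match token_list words → Spec_tokens_full_match token_list words (tokens_full_match token_list words)

-- ===== LEMMAS AND PROOFS =====

lemma fswLoop_prefix (l : List String) (sLen : Nat) (tmp : List Char) (tmpIdx : Nat) :
    tmp <+: (fswLoop l sLen tmp tmpIdx).1 := by
  fun_induction fswLoop with
  | case1 tmp tmpIdx h ih => exact List.IsPrefix.trans (List.prefix_append _ _) ih
  | case2 => simp

lemma peelB_le (toks : List String) (j : Nat) (rest : List Char) (j' : Nat)
    (h : peelB toks j rest = some j') : j ≤ j' := by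
  fun_induction peelB generalizing j' with
  | case1 => simp_all
  | case2 j rest hne hlt hsw ih => exact le_trans (by omega) (ih _ h)
  | case3 => simp_all
  | case4 => simp_all

lemma loop_peel (s : List Char) (toks : List String) :
    ∀ n idx tmp, toks.length - idx ≤ n → tmp <+: s →
    peelB toks idx (s.drop tmp.length) =
      (if (fswLoop toks s.length tmp idx).1 = s then some (fswLoop toks s.length tmp idx).2 else none) := by
  intro n
  induction n with
  | zero =>
    intro idx tmp hn hp
    by_cases hdrop : s.drop tmp.length = []
    · have hlen : tmp.length = s.length :=
        le_antisymm hp.length_le (by simpa using List.drop_eq_nil_iff.mp hdrop)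
      have : tmp = s := hp.eq_of_length hlen
      subst this
      rw [peelB, fswLoop]
      simp [hdrop]
    · have hlt : tmp.length < s.length := by
        rcases Nat.lt_or_ge tmp.length s.length with h | h
        · exact h
        · exact absurd (List.drop_eq_nil_iff.mpr h) hdrop
      have hidx : ¬ idx < toks.length := by omega
      rw [peelB, fswLoop]
      have hne : tmp ≠ s := fun h => by simp [h] at hlt
      simp [hdrop, hidx, hne, hlt]
  | succ n ih =>
    intro idx tmp hn hp
    by_cases hdrop : s.drop tmp.length = []
    · have hlen : tmp.length = s.length :=
        le_antisymm hp.length_le (by simpa using List.drop_eq_nil_iff.mp hdrop)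
      have : tmp = s := hp.eq_of_length hlen
      subst this
      rw [peelB, fswLoop]
      simp [hdrop]
    · have hlt : tmp.length < s.length := by
        rcases Nat.lt_or_ge tmp.length s.length with h | h
        · exact h
        · exact absurd (List.drop_eq_nil_iff.mpr h) hdrop
      have hne : tmp ≠ s := fun h => by simp [h] at hlt
      by_cases hidx : idx < toks.length
      · obtain ⟨r, hr⟩ := hp
        have hdr : s.drop tmp.length = r := by rw [← hr]; simp
        rw [peelB, fswLoop]
        have hgetD : toks.getD idx "" = toks[idx] := List.getD_eq_getElem _ _ hidx
        by_cases hsw : toks[idx].toList <+: s.drop tmp.length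
        · have hswb : PySem.Chars.startswith (s.drop tmp.length) toks[idx].toList = true :=
            (PySem.Chars.startswith_iff _ _).mpr hsw
          have hp2 : tmp ++ toks[idx].toList <+: s := by
            rw [hdr] at hsw; obtain ⟨r2, hr2⟩ := hsw
            exact ⟨r2, by rw [List.append_assoc, hr2, hr]⟩
          have hdd : (s.drop tmp.length).drop toks[idx].toList.length =
              s.drop (tmp ++ toks[idx].toList).length := by
            rw [List.drop_drop, List.length_append]
          rw [if_neg hdrop, dif_pos hidx, if_pos hswb, dif_pos (⟨hlt, hidx⟩ : tmp.length < s.length ∧ idx < toks.length), hgetD, hdd]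
          exact ih (idx + 1) (tmp ++ toks[idx].toList) (by omega) hp2
        · have hres : (fswLoop toks s.length (tmp ++ (toks.getD idx "").toList) (idx + 1)).1 ≠ s := by
            intro hcontra
            have hpref := fswLoop_prefix toks s.length (tmp ++ (toks.getD idx "").toList) (idx + 1)
            rw [hcontra, hgetD] at hpref
            obtain ⟨r2, hr2⟩ := hpref
            rw [List.append_assoc] at hr2
            have : toks[idx].toList ++ r2 = r := by
              have := hr2.trans hr.symm
              exact List.append_cancel_left this
            exact hsw (by rw [hdr]; exact ⟨r2, this⟩)
          rw [hgetD] at hres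
          simp [hdrop, hidx, hlt, hres, PySem.Chars.startswith_iff, hsw]
      · rw [peelB, fswLoop]
        simp [hdrop, hidx, hne, hlt]


lemma find_agree (s : List Char) (hs : s ≠ []) (toks : List String) :
    ∀ rest i, rest = toks.drop i →
      (fswFind s toks i rest = (findSpanB s toks i rest).map (fun p => (p.1, p.2 - 1)) ∧
       ∀ p, findSpanB s toks i rest = some p → i + 1 ≤ p.2) := by
  intro rest
  induction rest with
  | nil => intro i h; simp [fswFind, findSpanB]
  | cons t ts ihr =>
    intro i h
    have hidx : i < toks.length := by
      by_contra hc
      rw [List.drop_eq_nil_iff.mpr (by omega)] at h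
      simp at h
    have hcons := List.drop_eq_getElem_cons hidx
    rw [← h] at hcons
    obtain ⟨hti', hts'⟩ := List.cons_eq_cons.mp hcons
    have hti : toks[i] = t := hti'.symm
    have hts : toks.drop (i + 1) = ts := hts'.symm
    have IH := ihr (i + 1) hts.symm
    by_cases htl : t.toList = []
    · have hcond : ¬(t.toList ≠ [] ∧ PySem.Chars.startswith s t.toList = true) := by simp [htl]
      have htl0 : t.toList.length = 0 := by simp [htl]
      rw [fswFind, findSpanB, if_pos htl0, if_neg hcond]
      exact ⟨IH.1, fun p hp => by have := IH.2 p hp; omega⟩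
    · have htl0 : ¬ t.toList.length = 0 := fun hc => htl (List.eq_nil_of_length_eq_zero hc)
      have hlp := loop_peel s toks toks.length i [] (by omega) List.nil_prefix
      rw [List.length_nil, List.drop_zero] at hlp
      rw [peelB, if_neg hs, dif_pos hidx, hti] at hlp
      by_cases hpre : t.toList <+: s
      · have hsw : PySem.Chars.startswith s t.toList = true := (PySem.Chars.startswith_iff _ _).mpr hpre
        rw [if_pos hsw] at hlp
        have hcondB : (t.toList ≠ [] ∧ PySem.Chars.startswith s t.toList = true) := ⟨htl, hsw⟩
        have hhead : (s.head? == t.toList.head?) = true := by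
          obtain ⟨r, hr⟩ := hpre
          cases s with
          | nil => exact absurd rfl hs
          | cons c cs =>
            cases hct : t.toList with
            | nil => exact absurd hct htl
            | cons d ds =>
              rw [hct] at hr
              simp at hr ⊢
              simp [← hr.1]
        rw [fswFind, findSpanB, if_neg htl0, if_pos hhead, if_pos hcondB]
        cases hP : peelB toks (i + 1) (s.drop t.toList.length) with
        | some j =>
          rw [hP] at hlp
          by_cases hr1 : (fswLoop toks s.length [] i).1 = s
          · rw [if_pos hr1] at hlp
            have hr2 : j = (fswLoop toks s.length [] i).2 := by simpa using hlp
            rw [if_pos hr1]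
            constructor
            · simp [← hr2]
            · intro p hp
              have hpj : p = (i, j) := by simpa using hp.symm
              subst hpj
              have := peelB_le toks (i + 1) (s.drop t.toList.length) j hP
              omega
          · rw [if_neg hr1] at hlp; simp at hlp
        | none =>
          rw [hP] at hlp
          have hr1 : ¬ (fswLoop toks s.length [] i).1 = s := by
            intro hc; rw [if_pos hc] at hlp; simp at hlp
          rw [if_neg hr1]
          exact ⟨IH.1, fun p hp => by have := IH.2 p hp; omega⟩
      · have hsw : PySem.Chars.startswith s t.toList = false := by
          cases hb : PySem.Chars.startswith s t.toList
          · rfl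
          · exact absurd ((PySem.Chars.startswith_iff _ _).mp hb) hpre
        rw [if_neg (by simp [hsw])] at hlp
        have hr1 : ¬ (fswLoop toks s.length [] i).1 = s := by
          intro hc; rw [if_pos hc] at hlp; simp at hlp
        have hcond : ¬(t.toList ≠ [] ∧ PySem.Chars.startswith s t.toList = true) := by simp [hsw]
        rw [fswFind, findSpanB, if_neg htl0, if_neg hcond]
        refine ⟨?_, fun p hp => by have := IH.2 p hp; omega⟩
        by_cases hh : (s.head? == t.toList.head?) = true
        · rw [if_pos hh, if_neg hr1]; exact IH.1
        · rw [if_neg hh]; exact IH.1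

lemma step_eq :
    (fun (new_list : List String) (word : String) =>
      if word.toList.length = 0 then new_list
      else match fswFind word.toList new_list 0 new_list with
        | none => new_list
        | some (a, b) =>
          PySem.List.slice new_list none (some (a : Int))
            ++ [PySem.Str.join "" (PySem.List.slice new_list (some (a : Int)) (some ((b : Int) + 1)))]
            ++ PySem.List.slice new_list (some ((b : Int) + 1)) none) =
    (fun (new_list : List String) (word : String) =>
      if word.toList = [] then new_list
      else match findSpanB word.toList new_list 0 new_list with
        | none => new_list
        | some (i, j) =>
          PySem.List.slice new_list none (some (i : Int))
            ++ [PySem.Str.join "" (PySem.List.slice new_list (some (i : Int)) (some (j : Int)))]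
            ++ PySem.List.slice new_list (some (j : Int)) none) := by
  funext new_list word
  by_cases hw : word.toList = []
  · simp [hw]
  · have hw0 : ¬ word.toList.length = 0 := fun hc => hw (List.eq_nil_of_length_eq_zero hc)
    rw [if_neg hw0, if_neg hw]
    have FA := find_agree word.toList hw new_list new_list 0 List.drop_zero.symm
    rw [FA.1]
    cases hS : findSpanB word.toList new_list 0 new_list with
    | none => simp
    | some p =>
      obtain ⟨a, j⟩ := p
      have hj : 1 ≤ j := by have := FA.2 (a, j) hS; omega
      have hcast : ((j - 1 : Nat) : Int) + 1 = (j : Int) := by omega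
      simp only [Option.map]
      rw [hcast]

-- ===== VERDICT (by name: the statement is the Claim_ definition above) =====
theorem tokens_full_match_spec : Claim_equal_tokens_full_match := by
  intro token_list words _
  unfold Spec_tokens_full_match tokens_full_match tokens_full_match_alt
  rw [step_eq]
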